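-- pv_equiv track=rewrite | github.com/Attyuttam/cp-practice | TLE eliminators/Div 800/cover_in_water.py | solution
-- ===== SOURCE A (Python) =====
-- def solution(n, arr):
--     i = 0
--     a = 0
--     while i<n:
--         if arr[i] == ".":
--             if i-1>=0 and i+1<n and arr[i-1] == "." and arr[i+1] == ".":
--                 return 2
--             else:
--                 a+=1
--         i+=1
--     return a
-- ===== SOURCE B (Python) =====
-- def solution(n, arr):
--     if any(arr[i - 1] == "." and arr[i] == "." and arr[i + 1] == "." for i in range(1, n - 1)):
--         return 2
--     return sum(1 for i in range(n) if arr[i] == ".")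
-- ===== Notes on version B (the rewrite author's own statement) =====
-- stated objective: simpler
-- what changed: A's single interleaved while-loop (counting dots and testing for a centred '...' triple at each step) is split into two separate passes: a triple-detection any() over range(1, n-1) followed by a plain sum() counting dots over range(n).
-- outside the precondition, e.g. on solution(5, ['.', '.', '.']): A returns 2, B returns 2
import Mathlib
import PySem

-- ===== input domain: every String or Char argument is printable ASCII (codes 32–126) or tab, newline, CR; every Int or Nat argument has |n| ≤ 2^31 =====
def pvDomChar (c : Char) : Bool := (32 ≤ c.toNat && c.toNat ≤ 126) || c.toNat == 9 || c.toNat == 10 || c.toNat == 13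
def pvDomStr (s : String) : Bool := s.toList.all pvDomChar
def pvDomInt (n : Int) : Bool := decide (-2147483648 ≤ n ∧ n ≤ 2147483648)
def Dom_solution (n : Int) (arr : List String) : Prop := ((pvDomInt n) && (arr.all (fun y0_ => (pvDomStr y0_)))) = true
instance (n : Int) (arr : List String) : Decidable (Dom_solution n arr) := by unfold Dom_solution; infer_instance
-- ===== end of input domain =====

-- B splits A's single interleaved while-loop into two separate passes (triple detection, then a dot count) — objective: simpler.

-- ===== PORT A =====
-- A's while-loop: i counts up while i < n, a accumulates; fuel = n.toNat bounds the iterations.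
def solLoop (n : Int) (arr : List String) : Nat → Int → Int → Int
  | 0, _, a => a
  | fuel+1, i, a =>
    if i < n then
      if PySem.List.pyGet? arr i = some "." then
        if 0 ≤ i - 1 ∧ i + 1 < n ∧ PySem.List.pyGet? arr (i-1) = some "." ∧ PySem.List.pyGet? arr (i+1) = some "." then
          2
        else
          solLoop n arr fuel (i+1) (a+1)
      else
        solLoop n arr fuel (i+1) a
    else a

def solution (n : Int) (arr : List String) : Int :=
  solLoop n arr n.toNat 0 0

-- ===== PORT B =====
def solution_alt (n : Int) (arr : List String) : Int :=
  if (PySem.List.pyRange 1 (n-1) 1).any (fun i =>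
        (PySem.List.pyGet? arr (i-1) == some ".") && (PySem.List.pyGet? arr i == some ".")
          && (PySem.List.pyGet? arr (i+1) == some "."))
  then 2
  else (PySem.List.pyRange 0 n 1).foldl
        (fun a i => if PySem.List.pyGet? arr i = some "." then a + 1 else a) 0

-- ===== PRECONDITION & SPEC =====
-- Pre_ excludes n > len(arr), on which A's positional access arr[i] raises IndexError (except when a
-- leading '...' triple makes A return 2 first — B also returns 2 there, but the raising cases must go).
def Pre_solution (n : Int) (arr : List String) : Prop := n ≤ (arr.length : Int)
instance (n : Int) (arr : List String) : Decidable (Pre_solution n arr) := by unfold Pre_solution; infer_instance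
def pvWitness_solution : Int × List String := (2, [".", "x"])

def Spec_solution (n : Int) (arr : List String) (out : Int) : Prop := out = solution_alt n arr
instance (n : Int) (arr : List String) (out : Int) : Decidable (Spec_solution n arr out) := by unfold Spec_solution; infer_instance

-- ===== CLAIM (what is proved, stated in full; the proofs are below) =====
def Claim_equal_solution : Prop := ∀ (n : Int) (arr : List String), Dom_solution n arr → Pre_solution n arr → Spec_solution n arr (solution n arr)

-- ===== LEMMAS AND PROOFS =====

-- Characterisation of A's loop from position i: 2 if some guarded triple lies ahead, else the running
-- count a plus the dots at positions i..n-1.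
theorem solLoop_char (n : Int) (arr : List String) :
    ∀ (fuel : Nat) (i a : Int), 0 ≤ i → (n - i).toNat ≤ fuel →
    solLoop n arr fuel i a =
      if (PySem.List.pyRange i (n-1) 1).any (fun j =>
            decide (1 ≤ j) && (PySem.List.pyGet? arr (j-1) == some ".")
              && (PySem.List.pyGet? arr j == some ".") && (PySem.List.pyGet? arr (j+1) == some "."))
      then 2
      else (PySem.List.pyRange i n 1).foldl
            (fun a i => if PySem.List.pyGet? arr i = some "." then a + 1 else a) a := by
  intro fuel
  induction fuel with
  | zero =>
    intro i a hi hf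
    have hni : n ≤ i := by omega
    rw [PySem.List.pyRange_one_eq_nil (by omega : n - 1 ≤ i),
        PySem.List.pyRange_one_eq_nil hni]
    simp [solLoop]
  | succ fuel ih =>
    intro i a hi hf
    by_cases hin : i < n
    · have hcnt : PySem.List.pyRange i n 1 = i :: PySem.List.pyRange (i+1) n 1 :=
        PySem.List.pyRange_one_cons hin
      by_cases hdot : PySem.List.pyGet? arr i = some "."
      · by_cases htri : 0 ≤ i - 1 ∧ i + 1 < n ∧ PySem.List.pyGet? arr (i-1) = some "." ∧ PySem.List.pyGet? arr (i+1) = some "."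
        · -- A returns 2; detection finds the triple at j = i
          have hlt : i < n - 1 := by omega
          rw [solLoop]
          simp only [if_pos hin, if_pos hdot, if_pos htri]
          rw [PySem.List.pyRange_one_cons hlt]
          have h1 : (1:Int) ≤ i := by omega
          simp [List.any_cons, h1, hdot, htri.2.2.1, htri.2.2.2]
        · -- no triple at i: step past, detection/count tails agree
          rw [solLoop]
          simp only [if_pos hin, if_pos hdot, if_neg htri]
          rw [ih (i+1) (a+1) (by omega) (by omega), hcnt]
          by_cases hlt : i < n - 1
          · rw [PySem.List.pyRange_one_cons hlt]
            have hpfalse : (decide ((1:Int) ≤ i) && (PySem.List.pyGet? arr (i-1) == some ".")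
                && (PySem.List.pyGet? arr i == some ".") && (PySem.List.pyGet? arr (i+1) == some ".")) = false := by
              by_cases h1 : (1:Int) ≤ i
              · have : ¬ (PySem.List.pyGet? arr (i-1) = some "." ∧ PySem.List.pyGet? arr (i+1) = some ".") := by
                  intro h; exact htri ⟨by omega, by omega, h.1, h.2⟩
                by_cases ha : PySem.List.pyGet? arr (i-1) = some "."
                · have hb : ¬ PySem.List.pyGet? arr (i+1) = some "." := fun hb => this ⟨ha, hb⟩
                  simp [h1, ha, hb]
                · simp [ha]
              · simp [h1]
            simp only [List.any_cons]
            simp only [hpfalse, Bool.false_or]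
            simp [hdot]
          · have hle : n - 1 ≤ i := by omega
            rw [PySem.List.pyRange_one_eq_nil hle, PySem.List.pyRange_one_eq_nil (by omega : n - 1 ≤ i + 1)]
            simp [hdot]
      · -- arr[i] ≠ '.': both detection predicate at i and the count step are no-ops
        rw [solLoop]
        simp only [if_pos hin, if_neg hdot]
        rw [ih (i+1) a (by omega) (by omega), hcnt]
        by_cases hlt : i < n - 1
        · rw [PySem.List.pyRange_one_cons hlt]
          have hpfalse : (decide ((1:Int) ≤ i) && (PySem.List.pyGet? arr (i-1) == some ".")
              && (PySem.List.pyGet? arr i == some ".") && (PySem.List.pyGet? arr (i+1) == some ".")) = false := by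
            simp [hdot]
          simp only [List.any_cons]
          simp only [hpfalse, Bool.false_or]
          simp [hdot]
        · have hle : n - 1 ≤ i := by omega
          rw [PySem.List.pyRange_one_eq_nil hle, PySem.List.pyRange_one_eq_nil (by omega : n - 1 ≤ i + 1)]
          simp [hdot]
    · rw [solLoop]
      simp only [if_neg hin]
      rw [PySem.List.pyRange_one_eq_nil (by omega : n - 1 ≤ i),
          PySem.List.pyRange_one_eq_nil (by omega : n ≤ i)]
      simp

-- The guarded detection any over range(0, n-1) equals B's unguarded any over range(1, n-1).
theorem det_shift (n : Int) (arr : List String) :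
    (PySem.List.pyRange 0 (n-1) 1).any (fun j =>
        decide (1 ≤ j) && (PySem.List.pyGet? arr (j-1) == some ".")
          && (PySem.List.pyGet? arr j == some ".") && (PySem.List.pyGet? arr (j+1) == some "."))
      = (PySem.List.pyRange 1 (n-1) 1).any (fun i =>
        (PySem.List.pyGet? arr (i-1) == some ".") && (PySem.List.pyGet? arr i == some ".")
          && (PySem.List.pyGet? arr (i+1) == some ".")) := by
  by_cases h : (0:Int) < n - 1
  · rw [PySem.List.pyRange_one_cons h]
    simp only [List.any_cons]
    have h0 : (decide ((1:Int) ≤ 0) && (PySem.List.pyGet? arr (0-1) == some ".")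
        && (PySem.List.pyGet? arr 0 == some ".") && (PySem.List.pyGet? arr (0+1) == some ".")) = false := by
      simp
    rw [h0, Bool.false_or]
    refine PySem.List.any_congr_mem ?_
    intro j hj
    have : (1:Int) ≤ j := (PySem.List.mem_pyRange_one.mp hj).1
    simp [this]
  · rw [PySem.List.pyRange_one_eq_nil (by omega : n - 1 ≤ 0),
        PySem.List.pyRange_one_eq_nil (by omega : n - 1 ≤ 1)]
    rfl

-- ===== VERDICT (by name: the statement is the Claim_ definition above) =====
theorem solution_spec : Claim_equal_solution := by
  intro n arr _ _
  unfold Spec_solution solution solution_alt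
  rw [solLoop_char n arr n.toNat 0 0 le_rfl (by omega), det_shift]
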